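-- pv_equiv track=rewrite | github.com/mishra-31/Text-Analysis | Text Analysis.py | num_syllables
-- ===== SOURCE A (Python) =====
-- def num_syllables(words):
--     num=0
--     for word in words:
--         word = word.lower()
--         count = 0
--         vowels = "aeiouy"
--         if word[0] in vowels:
--             count += 1
--         for index in range(1, len(word)):
--             if word[index] in vowels and word[index - 1] not in vowels:
--                 count += 1
--         if word.endswith("e"):
--             count -= 1
--         if count == 0:
--             count += 1
--         if count>2:
--             num+=1
--     return num
-- ===== SOURCE B (Python) =====
-- def num_syllables(words):
--     total = 0
--     for word in words:
--         word = word.lower()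
--         masked = ''.join(c if c in "aeiouy" else ' ' for c in word)
--         count = len(masked.split())
--         if word.endswith("e"):
--             count -= 1
--         if count == 0:
--             count = 1
--         if count > 2:
--             total += 1
--     return total
-- ===== Notes on version B (the rewrite author's own statement) =====
-- stated objective: alternative
-- what changed: B replaces A's per-index predecessor scan by two staged passes: it blanks every non-vowel to a space and then counts the tokens of str.split(), which are exactly the maximal vowel runs; B also returns normally on empty words where A raises.
-- crash fix: A raises IndexError (word[0]) whenever some word is the empty string; B returns normally there, the empty word contributing 0 to the total. — e.g. on num_syllables([""]): A raises IndexError, B returns 0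
import Mathlib
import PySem

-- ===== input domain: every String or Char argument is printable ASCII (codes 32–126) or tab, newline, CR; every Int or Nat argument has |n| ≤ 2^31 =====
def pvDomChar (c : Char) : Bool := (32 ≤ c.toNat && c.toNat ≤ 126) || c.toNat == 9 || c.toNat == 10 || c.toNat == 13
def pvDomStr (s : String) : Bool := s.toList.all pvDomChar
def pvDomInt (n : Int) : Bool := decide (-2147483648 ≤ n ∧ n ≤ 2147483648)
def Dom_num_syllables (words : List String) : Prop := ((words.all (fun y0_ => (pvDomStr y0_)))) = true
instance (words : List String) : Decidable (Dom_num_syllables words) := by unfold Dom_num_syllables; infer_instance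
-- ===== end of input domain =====

-- B blanks non-vowels to spaces and counts str.split() tokens (= maximal vowel runs) instead of A's per-index predecessor scan; equal on lists of nonempty words (A raises IndexError on empty words).

-- ===== PORT A =====
def pvVowel (c : Char) : Bool := c = 'a' || c = 'e' || c = 'i' || c = 'o' || c = 'u' || c = 'y'

-- word[0]: Python raises IndexError on an empty word; Pre_ excludes that, so the default 'b' is never read on an empty word inside Pre_
def pvACount (ls : List Char) : Int :=
  (PySem.List.pyRange 1 (PySem.List.len ls) 1).foldl
    (fun count i =>
      if pvVowel (PySem.List.pyGetD ls i 'b') && !pvVowel (PySem.List.pyGetD ls (i - 1) 'b')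
      then count + 1 else count)
    (if pvVowel (PySem.List.pyGetD ls 0 'b') then 1 else 0)

def pvAWord (w : String) : Int :=
  let ls := PySem.Chars.lower w.toList
  let count := pvACount ls
  let count := if PySem.Chars.endswith ls ['e'] then count - 1 else count
  let count := if count = 0 then count + 1 else count
  count

def num_syllables (words : List String) : Int :=
  words.foldl (fun num w => if pvAWord w > 2 then num + 1 else num) 0

-- ===== PORT B =====
-- ''.join(c if c in "aeiouy" else ' ' for c in word) : every non-vowel becomes a space
def pvMask (c : Char) : Char := if pvVowel c then c else ' '

def pvBWord (w : String) : Int :=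
  let ls := PySem.Chars.lower w.toList
  let masked := ls.map pvMask
  let count : Int := (PySem.Chars.split₀ masked).length
  let count := if PySem.Chars.endswith ls ['e'] then count - 1 else count
  if count = 0 then 1 else count

def num_syllables_alt (words : List String) : Int :=
  words.foldl (fun total w => if pvBWord w > 2 then total + 1 else total) 0

-- ===== PRECONDITION & SPEC =====
-- Pre_ excludes lists containing an empty word: there Python A raises IndexError at word[0]
def Pre_num_syllables (words : List String) : Prop := (words.all (fun w => !w.isEmpty)) = true
instance (words : List String) : Decidable (Pre_num_syllables words) := by unfold Pre_num_syllables; infer_instance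
def pvWitness_num_syllables : List String := (["Hello", "banana", "idea"])

-- A raises IndexError (word[0]) whenever some word is the empty string; B returns normally there, the empty word contributing 0 to the total.
def Raises_num_syllables (words : List String) : Prop := (words.any (fun w => w.isEmpty)) = true
instance (words : List String) : Decidable (Raises_num_syllables words) := by unfold Raises_num_syllables; infer_instance
def pvRaiseWitness_num_syllables : List String := ([""])
def pvRaiseWitnessOut_num_syllables : Int := 0

def Spec_num_syllables (words : List String) (out : Int) : Prop := out = num_syllables_alt words
instance (words : List String) (out : Int) : Decidable (Spec_num_syllables words out) := by unfold Spec_num_syllables; infer_instance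

-- ===== CLAIM (what is proved, stated in full; the proofs are below) =====
def Claim_equal_num_syllables : Prop := ∀ (words : List String), Dom_num_syllables words → Pre_num_syllables words → Spec_num_syllables words (num_syllables words)
def Claim_raises_num_syllables : Prop := (∀ (words : List String), Dom_num_syllables words → Raises_num_syllables words → ¬ Pre_num_syllables words) ∧ (Dom_num_syllables (pvRaiseWitness_num_syllables) ∧ Raises_num_syllables (pvRaiseWitness_num_syllables) ∧ num_syllables_alt (pvRaiseWitness_num_syllables) = pvRaiseWitnessOut_num_syllables)

-- ===== LEMMAS AND PROOFS =====

-- number of maximal vowel runs, as mutual recursion (proof-side reference count)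
mutual
def pvRuns : List Char → Int
  | [] => 0
  | c :: t => if pvVowel c then 1 + pvRun t else pvRuns t
def pvRun : List Char → Int
  | [] => 0
  | c :: t => if pvVowel c then pvRun t else pvRuns t
end

-- A's inner loop, seen from position pre.length + 1, as a scan carrying the previous character
def pvPairScan (p : Char) : List Char → Int
  | [] => 0
  | c :: t => (if pvVowel c && !pvVowel p then 1 else 0) + pvPairScan c t

theorem pv_fold_pairScan : ∀ (rest pre : List Char) (c : Char) (acc : Int),
    (PySem.List.pyRange ((pre.length : Int) + 1) ((pre.length : Int) + 1 + rest.length) 1).foldl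
      (fun count i =>
        if pvVowel (PySem.List.pyGetD (pre ++ c :: rest) i 'b') &&
           !pvVowel (PySem.List.pyGetD (pre ++ c :: rest) (i - 1) 'b')
        then count + 1 else count) acc
    = acc + pvPairScan c rest := by
  intro rest
  induction rest with
  | nil =>
      intro pre c acc
      rw [show ((pre.length : Int) + 1 + ([] : List Char).length) = (pre.length : Int) + 1 by simp,
          PySem.List.pyRange_one_eq_nil (le_refl _)]
      simp [pvPairScan]
  | cons d rest ih =>
      intro pre c acc
      rw [PySem.List.pyRange_one_cons (by simp only [List.length_cons]; push_cast; omega)]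
      simp only [List.foldl_cons]
      have h1 : PySem.List.pyGetD (pre ++ c :: d :: rest) ((pre.length : Int) + 1) 'b' = d := by
        have : ((pre.length : Int) + 1) = ((pre.length + 1 : Nat) : Int) := by push_cast; ring
        rw [this, PySem.List.pyGetD_natCast]
        simp [List.getD]
      have h2 : PySem.List.pyGetD (pre ++ c :: d :: rest) ((pre.length : Int) + 1 - 1) 'b' = c := by
        have : ((pre.length : Int) + 1 - 1) = ((pre.length : Nat) : Int) := by ring
        rw [this, PySem.List.pyGetD_natCast]
        simp [List.getD]
      rw [h1, h2]
      have hlist : pre ++ c :: d :: rest = (pre ++ [c]) ++ d :: rest := by simp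
      have hlen : ((pre.length : Int) + 1) + 1 = ((pre ++ [c]).length : Int) + 1 := by
        simp only [List.length_append, List.length_cons, List.length_nil]; push_cast; ring
      have hlen2 : (pre.length : Int) + 1 + ((d :: rest).length : Int)
          = ((pre ++ [c]).length : Int) + 1 + (rest.length : Int) := by
        simp only [List.length_append, List.length_cons, List.length_nil]; push_cast; ring
      rw [hlist, hlen, hlen2, ih (pre ++ [c]) d]
      cases hc : pvVowel c <;> cases hd : pvVowel d <;>
        simp [pvPairScan, hc, hd] <;> omega

theorem pv_pairScan_eq (p : Char) (t : List Char) :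
    pvPairScan p t = if pvVowel p then pvRun t else pvRuns t := by
  induction t generalizing p with
  | nil => simp [pvPairScan, pvRun, pvRuns]
  | cons c t ih =>
      cases hp : pvVowel p <;> cases hc : pvVowel c <;>
        simp [pvPairScan, pvRun, pvRuns, hp, hc, ih c]

theorem pv_count_eq (ls : List Char) : pvACount ls = pvRuns ls := by
  cases ls with
  | nil => decide
  | cons c rest =>
      have key := pv_fold_pairScan rest [] c
        (if pvVowel (PySem.List.pyGetD (c :: rest) 0 'b') then 1 else 0)
      simp only [List.length_nil, Nat.cast_zero, zero_add, List.nil_append] at key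
      simp only [pvACount, PySem.List.len_eq, List.length_cons]
      rw [show ((rest.length + 1 : Nat) : Int) = 1 + (rest.length : Int) by push_cast; ring]
      refine key.trans ?_
      rw [PySem.List.pyGetD_zero_cons, pv_pairScan_eq]
      cases hc : pvVowel c <;> simp [pvRuns, hc]

-- maximal NON-SPACE runs, the count str.split() yields
mutual
def pvNsRuns : List Char → Int
  | [] => 0
  | c :: t => if PySem.Chars.isspace c then pvNsRuns t else 1 + pvNsRun t
def pvNsRun : List Char → Int
  | [] => 0
  | c :: t => if PySem.Chars.isspace c then pvNsRuns t else pvNsRun t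
end

theorem pv_split_go_len : ∀ (rest cur : List Char) (acc : List (List Char)),
    ((PySem.Chars.split₀.go rest cur acc).length : Int)
      = acc.length + (if cur.isEmpty then pvNsRuns rest else 1 + pvNsRun rest) := by
  intro rest
  induction rest with
  | nil =>
      intro cur acc
      cases cur <;> simp [PySem.Chars.split₀.go, pvNsRuns, pvNsRun]
  | cons c rest ih =>
      intro cur acc
      by_cases hs : PySem.Chars.isspace c = true
      · cases cur with
        | nil => simp [PySem.Chars.split₀.go, hs, ih, pvNsRuns]
        | cons x xs =>
            simp [PySem.Chars.split₀.go, hs, ih, pvNsRun]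
            ring
      · cases cur
        · simp [PySem.Chars.split₀.go, hs, ih, pvNsRuns]
        · simp [PySem.Chars.split₀.go, hs, ih, pvNsRun]

theorem pv_isspace_mask (c : Char) : PySem.Chars.isspace (pvMask c) = !pvVowel c := by
  by_cases h : pvVowel c = true
  · simp only [pvMask, h, if_pos]
    simp only [pvVowel, Bool.or_eq_true, decide_eq_true_eq] at h
    rcases h with ((((h|h)|h)|h)|h)|h <;> subst h <;> decide
  · simp only [Bool.not_eq_true] at h
    simp [pvMask, h]
    decide

theorem pv_nsRuns_mask (ls : List Char) :
    pvNsRuns (ls.map pvMask) = pvRuns ls ∧ pvNsRun (ls.map pvMask) = pvRun ls := by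
  induction ls with
  | nil => exact ⟨rfl, rfl⟩
  | cons c t ih =>
      simp only [List.map_cons, pvNsRuns, pvNsRun, pvRuns, pvRun, pv_isspace_mask, ih.1, ih.2]
      cases hc : pvVowel c <;> simp

theorem pv_split_len (ls : List Char) :
    ((PySem.Chars.split₀ (ls.map pvMask)).length : Int) = pvRuns ls := by
  rw [show PySem.Chars.split₀ (ls.map pvMask) = PySem.Chars.split₀.go (ls.map pvMask) [] [] from rfl,
      pv_split_go_len]
  simp [(pv_nsRuns_mask ls).1]

theorem pv_word_eq (w : String) : pvAWord w = pvBWord w := by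
  simp only [pvAWord, pvBWord, pv_count_eq, pv_split_len]
  split_ifs <;> omega

-- ===== VERDICT (by name: the statement is the Claim_ definition above) =====
theorem num_syllables_spec : Claim_equal_num_syllables := by
  intro words _ _
  unfold Spec_num_syllables num_syllables num_syllables_alt
  simp only [pv_word_eq]

@[simp] theorem num_syllables_raises : Claim_raises_num_syllables := by
  unfold Claim_raises_num_syllables
  refine ⟨?_, by decide⟩
  intro words _ hr hp
  unfold Raises_num_syllables at hr
  unfold Pre_num_syllables at hp
  simp only [List.any_eq_true] at hr
  simp only [List.all_eq_true] at hp
  obtain ⟨w, hw, he⟩ := hr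
  have := hp w hw
  simp [he] at this
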